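-- pv_equiv track=rewrite | github.com/qiweiwang/RL | utility.py | findAllActions
-- ===== SOURCE A (Python) =====
-- def findAllActions(numberOfQueues):
--     actionList = []
--     for j in range(numberOfQueues+1):
--         action = ''
--         for i in range(numberOfQueues+1):
--             if i == j:
--                 action = action + '1'
--             else:
--                 action = action + '0'
--         actionList.append(action)
--     return actionList
-- ===== SOURCE B (Python) =====
-- def findAllActions(numberOfQueues):
--     return ['0' * j + '1' + '0' * (numberOfQueues - j)
--             for j in range(numberOfQueues + 1)]
-- ===== Notes on version B (the rewrite author's own statement) =====
-- stated objective: simpler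
-- what changed: Each one-hot row is built in closed form by string repetition ('0'*j + '1' + '0'*(n-j)) in a single comprehension, eliminating A's inner per-position scan with its i==j test.
import Mathlib
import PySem

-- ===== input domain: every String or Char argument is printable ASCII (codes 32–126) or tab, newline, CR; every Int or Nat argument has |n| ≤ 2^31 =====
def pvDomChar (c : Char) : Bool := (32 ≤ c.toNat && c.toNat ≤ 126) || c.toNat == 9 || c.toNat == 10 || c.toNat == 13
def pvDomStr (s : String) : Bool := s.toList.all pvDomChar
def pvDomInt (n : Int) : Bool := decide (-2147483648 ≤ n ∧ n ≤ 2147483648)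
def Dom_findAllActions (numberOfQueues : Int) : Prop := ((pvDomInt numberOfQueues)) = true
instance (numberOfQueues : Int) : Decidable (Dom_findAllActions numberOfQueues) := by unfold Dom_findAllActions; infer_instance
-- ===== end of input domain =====

-- B builds each one-hot row in closed form by character repetition instead of A's inner per-position scan; objective: simpler.

-- ===== PORT A =====
-- Python's quadratic "action = action + c" is ported as the standard linear loop compilation:
-- the same character is produced at each step, accumulated by cons and reversed at the end.
def findAllActions (numberOfQueues : Int) : List String :=
  (PySem.List.pyRange 0 (numberOfQueues + 1) 1).foldl
    (fun actionList j =>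
      actionList ++ [String.ofList ((PySem.List.pyRange 0 (numberOfQueues + 1) 1).foldl
        (fun action i => (if i == j then '1' else '0') :: action) []).reverse])
    []

-- ===== PORT B =====
def findAllActions_alt (numberOfQueues : Int) : List String :=
  (PySem.List.pyRange 0 (numberOfQueues + 1) 1).map
    (fun j => String.ofList (List.replicate j.toNat '0' ++ '1' :: List.replicate (numberOfQueues - j).toNat '0'))

-- ===== PRECONDITION & SPEC =====
def Spec_findAllActions (numberOfQueues : Int) (out : List String) : Prop := out = findAllActions_alt numberOfQueues
instance (numberOfQueues : Int) (out : List String) : Decidable (Spec_findAllActions numberOfQueues out) := by unfold Spec_findAllActions; infer_instance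

-- ===== CLAIM (what is proved, stated in full; the proofs are below) =====
def Claim_equal_findAllActions : Prop := ∀ (numberOfQueues : Int), Dom_findAllActions numberOfQueues → Spec_findAllActions numberOfQueues (findAllActions numberOfQueues)

-- ===== LEMMAS AND PROOFS =====

-- cons-accumulating fold = reversed map (shape of A's inner loop)
lemma foldl_cons_eq_reverse_map {α β : Type} (g : α → β) :
    ∀ (l : List α) (acc : List β), l.foldl (fun a x => g x :: a) acc = (l.map g).reverse ++ acc := by
  intro l
  induction l with
  | nil => intro acc; simp
  | cons x xs ih => intro acc; simp [List.foldl_cons, ih]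

-- A's inner loop past the hot index: every remaining position emits '0'.
lemma map_zeros (j : Int) : ∀ (k : Nat) (c b : Int), j < c → (b - c).toNat = k →
    (PySem.List.pyRange c b 1).map (fun i => if i == j then '1' else '0')
      = List.replicate k '0' := by
  intro k
  induction k with
  | zero => intro c b _ hk; rw [PySem.List.pyRange_one_eq_nil (by omega)]; simp
  | succ m ih =>
    intro c b hc hk
    rw [PySem.List.pyRange_one_cons (by omega)]
    have hne : (c == j) = false := by simp; omega
    simp only [List.map_cons, hne, Bool.false_eq_true, if_neg, not_false_iff]
    rw [ih (c + 1) b (by omega) (by omega)]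
    simp [List.replicate_succ]

-- Characterisation of A's inner loop: scanning range(a, b) and emitting '1' at i = j, '0' elsewhere,
-- yields j - a zeros, a one, then b - 1 - j zeros.
lemma map_onehot : ∀ (k : Nat) (a b j : Int), (j - a).toNat = k → a ≤ j → j < b →
    (PySem.List.pyRange a b 1).map (fun i => if i == j then '1' else '0')
      = List.replicate k '0' ++ '1' :: List.replicate (b - 1 - j).toNat '0' := by
  intro k
  induction k with
  | zero =>
    intro a b j hk ha hb
    have haj : a = j := by omega
    subst haj
    rw [PySem.List.pyRange_one_cons (by omega)]
    simp only [List.map_cons, beq_self_eq_true, if_pos]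
    rw [map_zeros a (b - 1 - a).toNat (a + 1) b (by omega) (by omega)]
    simp
  | succ m ih =>
    intro a b j hk ha hb
    rw [PySem.List.pyRange_one_cons (by omega)]
    have hne : (a == j) = false := by simp; omega
    simp only [List.map_cons, hne, Bool.false_eq_true, if_neg, not_false_iff]
    rw [ih (a + 1) b j (by omega) (by omega) (by omega)]
    simp [List.replicate_succ]

-- ===== VERDICT (by name: the statement is the Claim_ definition above) =====
theorem findAllActions_spec : Claim_equal_findAllActions := by
  intro n _
  unfold Spec_findAllActions findAllActions findAllActions_alt
  rw [PySem.List.foldl_append_singleton_eq_map]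
  simp only [List.nil_append]
  apply List.map_congr_left
  intro j hj
  rw [PySem.List.mem_pyRange_one] at hj
  rw [foldl_cons_eq_reverse_map, List.append_nil, List.reverse_reverse,
      map_onehot j.toNat 0 (n + 1) j (by omega) hj.1 hj.2]
  have h2 : n + 1 - 1 - j = n - j := by omega
  rw [h2]
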